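-- pv_equiv track=rewrite | github.com/blat-blatnik/Advent-of-Code | 2021/day22.py | activate
-- ===== SOURCE A (Python) =====
-- def overlap(range1, range2):
-- 	min1, max1 = range1
-- 	min2, max2 = range2
-- 	p1 = max(min1, min2)
-- 	p2 = min(max1, max2)
-- 	p2 = max(p1, p2)
-- 	return (p1, p2)
--
-- def intersect(cube1, cube2):
-- 	return (
-- 		overlap(cube1[0], cube2[0]),
-- 		overlap(cube1[1], cube2[1]),
-- 		overlap(cube1[2], cube2[2]))
--
-- def volume(cube):
-- 	(min1, max1), (min2, max2), (min3, max3) = cube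
-- 	return (max1 - min1) * (max2 - min2) * (max3 - min3)
--
-- def activate(commands):
-- 	on_cubes = []
-- 	off_cubes = []
-- 	on_volume = 0
-- 	for command, cube in commands:
-- 		on, off = len(on_cubes), len(off_cubes)
-- 		if command == 'on':
-- 			on_volume += volume(cube)
-- 			on_cubes.append(cube)
-- 		for on_cube in on_cubes[:on]:
-- 			i = intersect(cube, on_cube)
-- 			v = volume(i)
-- 			if v > 0:
-- 				on_volume -= v
-- 				off_cubes.append(i)
-- 		for off_cube in off_cubes[:off]:
-- 			i = intersect(cube, off_cube)
-- 			v = volume(i)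
-- 			if v > 0:
-- 				on_volume += v
-- 				on_cubes.append(i)
-- 	return on_volume
-- ===== SOURCE B (Python) =====
-- def clip(lo1, hi1, lo2, hi2):
-- 	lo = max(lo1, lo2)
-- 	return (lo, max(lo, min(hi1, hi2)))
--
-- def meet(a, b):
-- 	(x1, x2), (y1, y2), (z1, z2) = a
-- 	(u1, u2), (v1, v2), (w1, w2) = b
-- 	return (clip(x1, x2, u1, u2), clip(y1, y2, v1, v2), clip(z1, z2, w1, w2))
--
-- def vol(c):
-- 	(x1, x2), (y1, y2), (z1, z2) = c
-- 	return (x2 - x1) * (y2 - y1) * (z2 - z1)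
--
-- def covered(cube, rest):
-- 	# signed volume of `cube` claimed by the later commands `rest`
-- 	if not rest:
-- 		return 0
-- 	(_, c) = rest[0]
-- 	tail = rest[1:]
-- 	i = meet(cube, c)
-- 	hit = vol(i) - covered(i, tail) if vol(i) > 0 else 0
-- 	return hit + covered(cube, tail)
--
-- def activate(commands):
-- 	total = 0
-- 	for j, (cmd, cube) in enumerate(commands):
-- 		if cmd == 'on':
-- 			total += vol(cube) - covered(cube, commands[j + 1:])
-- 	return total
-- ===== Notes on version B (the rewrite author's own statement) =====
-- stated objective: alternative
-- what changed: Replaces A's global cross-command stores of spawned intersection cubes (on_cubes/off_cubes grown while iterating) by a per-command recursive computation: each 'on' command contributes vol(cube) minus a recursively computed signed 'covered' volume over the suffix of later commands, so no cube list is ever stored.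
import Mathlib
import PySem

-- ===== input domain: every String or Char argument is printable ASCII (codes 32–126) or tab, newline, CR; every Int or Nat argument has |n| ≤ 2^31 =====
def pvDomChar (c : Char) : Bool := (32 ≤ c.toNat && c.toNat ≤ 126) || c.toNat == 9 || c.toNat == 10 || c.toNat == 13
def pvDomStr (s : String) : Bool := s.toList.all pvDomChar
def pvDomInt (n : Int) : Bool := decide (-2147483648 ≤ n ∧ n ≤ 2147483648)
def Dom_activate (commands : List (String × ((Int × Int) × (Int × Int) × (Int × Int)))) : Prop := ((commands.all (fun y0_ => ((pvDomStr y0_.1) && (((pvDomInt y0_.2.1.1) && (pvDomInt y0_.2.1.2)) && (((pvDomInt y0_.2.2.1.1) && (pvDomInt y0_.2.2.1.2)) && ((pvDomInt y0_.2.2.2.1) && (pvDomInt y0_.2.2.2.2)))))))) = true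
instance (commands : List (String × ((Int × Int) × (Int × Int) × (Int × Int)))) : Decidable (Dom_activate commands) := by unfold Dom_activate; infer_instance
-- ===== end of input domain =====

-- B replaces A's global stores of spawned intersection cubes by a per-'on'-command
-- recursive signed "covered volume" over the suffix of later commands; objective: alternative.

abbrev PvCube := (Int × Int) × (Int × Int) × (Int × Int)

-- ===== PORT A =====
def overlapA (r1 r2 : Int × Int) : Int × Int :=
  let p1 := max r1.1 r2.1
  let p2 := min r1.2 r2.2
  (p1, max p1 p2)

def intersectA (c1 c2 : PvCube) : PvCube :=
  (overlapA c1.1 c2.1, overlapA c1.2.1 c2.2.1, overlapA c1.2.2 c2.2.2)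

def volumeA (c : PvCube) : Int :=
  (c.1.2 - c.1.1) * (c.2.1.2 - c.2.1.1) * (c.2.2.2 - c.2.2.1)

def activate (commands : List (String × ((Int × Int) × (Int × Int) × (Int × Int)))) : Int :=
  let st := commands.foldl (fun st cc =>
    let onC := st.1; let offC := st.2.1; let vol := st.2.2
    let command := cc.1; let cube := cc.2
    let on := onC.length
    let off := offC.length
    -- if command == 'on': on_volume += volume(cube); on_cubes.append(cube)
    let p1 := if command == "on" then (onC ++ [cube], vol + volumeA cube) else (onC, vol)
    let onC := p1.1; let vol := p1.2
    -- for on_cube in on_cubes[:on]  (slice with 0 ≤ on ≤ len = take)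
    let p2 := (onC.take on).foldl (fun (p : List PvCube × Int) on_cube =>
        let i := intersectA cube on_cube
        let v := volumeA i
        if v > 0 then (p.1 ++ [i], p.2 - v) else p) (offC, vol)
    let offC := p2.1; let vol := p2.2
    -- for off_cube in off_cubes[:off]
    let p3 := (offC.take off).foldl (fun (p : List PvCube × Int) off_cube =>
        let i := intersectA cube off_cube
        let v := volumeA i
        if v > 0 then (p.1 ++ [i], p.2 + v) else p) (onC, vol)
    (p3.1, offC, p3.2)) (([] : List PvCube), ([] : List PvCube), (0 : Int))
  st.2.2

-- ===== PORT B =====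
def clipB (lo1 hi1 lo2 hi2 : Int) : Int × Int :=
  let lo := max lo1 lo2
  (lo, max lo (min hi1 hi2))

def meetB (a b : PvCube) : PvCube :=
  (clipB a.1.1 a.1.2 b.1.1 b.1.2, clipB a.2.1.1 a.2.1.2 b.2.1.1 b.2.1.2,
   clipB a.2.2.1 a.2.2.2 b.2.2.1 b.2.2.2)

def volB (c : PvCube) : Int :=
  (c.1.2 - c.1.1) * (c.2.1.2 - c.2.1.1) * (c.2.2.2 - c.2.2.1)

-- signed volume of `cube` claimed by the later commands `rest`
def coveredB (cube : PvCube) : List (String × PvCube) → Int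
  | [] => 0
  | (_, c) :: tail =>
    let i := meetB cube c
    (if volB i > 0 then volB i - coveredB i tail else 0) + coveredB cube tail

-- Python's `for j, (cmd, cube) …: total += vol(cube) - covered(cube, commands[j+1:])`
-- over the 'on' commands, written as the equivalent recursion on suffixes
def activate_alt (commands : List (String × ((Int × Int) × (Int × Int) × (Int × Int)))) : Int :=
  match commands with
  | [] => 0
  | (cmd, cube) :: tail =>
      (if cmd == "on" then volB cube - coveredB cube tail else 0) + activate_alt tail

-- ===== PRECONDITION & SPEC =====
def Spec_activate (commands : List (String × ((Int × Int) × (Int × Int) × (Int × Int)))) (out : Int) : Prop := out = activate_alt commands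
instance (commands : List (String × ((Int × Int) × (Int × Int) × (Int × Int)))) (out : Int) : Decidable (Spec_activate commands out) := by unfold Spec_activate; infer_instance

-- ===== CLAIM (what is proved, stated in full; the proofs are below) =====
def Claim_equal_activate : Prop := ∀ (commands : List (String × ((Int × Int) × (Int × Int) × (Int × Int)))), Dom_activate commands → Spec_activate commands (activate commands)

-- ===== LEMMAS AND PROOFS =====

-- the cubes appended by one of A's inner loops, as a filterMap
def hits (cube : PvCube) (l : List PvCube) : List PvCube :=
  l.filterMap (fun c => let i := intersectA cube c; if volumeA i > 0 then some i else none)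

-- a sign-tagged signed-cube list: the proof-side intermediate between A and B
def tag (cube : PvCube) (l : List (PvCube × Int)) : List (PvCube × Int) :=
  l.filterMap (fun cs => let i := meetB cube cs.1; if volB i > 0 then some (i, -cs.2) else none)

def score (l : List (PvCube × Int)) : Int := (l.map (fun cs => cs.2 * volumeA cs.1)).sum

-- signed covered volume summed over a signed-cube list
def coveredL (l : List (PvCube × Int)) (cmds : List (String × PvCube)) : Int :=
  (l.map (fun cs => cs.2 * coveredB cs.1 cmds)).sum

lemma meetB_eq (a b : PvCube) : meetB a b = intersectA a b := by
  simp [meetB, intersectA, clipB, overlapA]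

lemma meetB_comm (a b : PvCube) : meetB a b = meetB b a := by
  simp [meetB, clipB]
  refine ⟨⟨?_, ?_⟩, ⟨?_, ?_⟩, ?_, ?_⟩ <;> omega

lemma volB_eq (c : PvCube) : volB c = volumeA c := rfl

lemma loop_sub (cube : PvCube) (l : List PvCube) : ∀ (acc : List PvCube) (v : Int),
    l.foldl (fun (p : List PvCube × Int) on_cube =>
        let i := intersectA cube on_cube
        let v := volumeA i
        if v > 0 then (p.1 ++ [i], p.2 - v) else p) (acc, v)
      = (acc ++ hits cube l, v - ((hits cube l).map volumeA).sum) := by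
  induction l with
  | nil => intro acc v; simp [hits]
  | cons c t ih =>
    intro acc v
    simp only [List.foldl_cons, hits, List.filterMap_cons]
    by_cases h : volumeA (intersectA cube c) > 0
    · simp only [h, ih]
      simp [hits]; ring
    · simp only [h, ih]
      simp [hits]

lemma loop_add (cube : PvCube) (l : List PvCube) : ∀ (acc : List PvCube) (v : Int),
    l.foldl (fun (p : List PvCube × Int) off_cube =>
        let i := intersectA cube off_cube
        let v := volumeA i
        if v > 0 then (p.1 ++ [i], p.2 + v) else p) (acc, v)
      = (acc ++ hits cube l, v + ((hits cube l).map volumeA).sum) := by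
  induction l with
  | nil => intro acc v; simp [hits]
  | cons c t ih =>
    intro acc v
    simp only [List.foldl_cons, hits, List.filterMap_cons]
    by_cases h : volumeA (intersectA cube c) > 0
    · simp only [h, ih]
      simp [hits]; ring
    · simp only [h, ih]
      simp [hits]

lemma tag_pos (cube : PvCube) (l : List PvCube) :
    tag cube (l.map (fun c => (c, (1:Int)))) = (hits cube l).map (fun c => (c, (-1:Int))) := by
  induction l with
  | nil => simp [tag, hits]
  | cons c t ih =>
    simp only [List.map_cons, tag, hits, List.filterMap_cons, meetB_eq, volB_eq] at *
    by_cases h : volumeA (intersectA cube c) > 0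
    · simp [h, ih]
    · simp [h, ih]

lemma tag_neg (cube : PvCube) (l : List PvCube) :
    tag cube (l.map (fun c => (c, (-1:Int)))) = (hits cube l).map (fun c => (c, (1:Int))) := by
  induction l with
  | nil => simp [tag, hits]
  | cons c t ih =>
    simp only [List.map_cons, tag, hits, List.filterMap_cons, meetB_eq, volB_eq] at *
    by_cases h : volumeA (intersectA cube c) > 0
    · simp [h, ih]
    · simp [h, ih]

lemma tag_perm (cube : PvCube) {l1 l2 : List (PvCube × Int)} (h : l1.Perm l2) :
    (tag cube l1).Perm (tag cube l2) := h.filterMap _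

lemma score_perm {l1 l2 : List (PvCube × Int)} (h : l1.Perm l2) : score l1 = score l2 := by
  exact (h.map _).sum_eq

lemma score_append (l1 l2 : List (PvCube × Int)) : score (l1 ++ l2) = score l1 + score l2 := by
  simp [score]

lemma score_pos (l : List PvCube) :
    score (l.map (fun c => (c, (1:Int)))) = (l.map volumeA).sum := by
  simp [score, Function.comp_def]

lemma score_neg (l : List PvCube) :
    score (l.map (fun c => (c, (-1:Int)))) = -(l.map volumeA).sum := by
  induction l with
  | nil => simp [score]
  | cons c t ih => simp [score, List.map_cons] at ih ⊢; omega

-- one step of the proof-side signed-cube list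
def stepS (cubes : List (PvCube × Int)) (cc : String × PvCube) : List (PvCube × Int) :=
  cubes ++ (if cc.1 == "on" then tag cc.2 cubes ++ [(cc.2, 1)] else tag cc.2 cubes)

-- the invariant relating A's state to the signed-cube list
def InvAB (st : List PvCube × List PvCube × Int) (cubes : List (PvCube × Int)) : Prop :=
  (st.1.map (fun c => (c, (1:Int))) ++ st.2.1.map (fun c => (c, (-1:Int)))).Perm cubes
  ∧ st.2.2 = score cubes

-- one step of A, named to state the preservation lemma
def stepA (st : List PvCube × List PvCube × Int) (cc : String × PvCube) :
    List PvCube × List PvCube × Int :=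
  let onC := st.1; let offC := st.2.1; let vol := st.2.2
  let command := cc.1; let cube := cc.2
  let on := onC.length
  let off := offC.length
  let p1 := if command == "on" then (onC ++ [cube], vol + volumeA cube) else (onC, vol)
  let onC := p1.1; let vol := p1.2
  let p2 := (onC.take on).foldl (fun (p : List PvCube × Int) on_cube =>
      let i := intersectA cube on_cube
      let v := volumeA i
      if v > 0 then (p.1 ++ [i], p.2 - v) else p) (offC, vol)
  let offC := p2.1; let vol := p2.2
  let p3 := (offC.take off).foldl (fun (p : List PvCube × Int) off_cube =>
      let i := intersectA cube off_cube
      let v := volumeA i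
      if v > 0 then (p.1 ++ [i], p.2 + v) else p) (onC, vol)
  (p3.1, offC, p3.2)

lemma activate_eq_foldl (commands : List (String × PvCube)) :
    activate commands = (commands.foldl stepA ([], [], 0)).2.2 := rfl

lemma stepA_closed (st : List PvCube × List PvCube × Int) (cc : String × PvCube) :
    stepA st cc =
      (((if cc.1 == "on" then st.1 ++ [cc.2] else st.1) ++ hits cc.2 st.2.1),
       st.2.1 ++ hits cc.2 st.1,
       (if cc.1 == "on" then st.2.2 + volumeA cc.2 else st.2.2)
         - ((hits cc.2 st.1).map volumeA).sum + ((hits cc.2 st.2.1).map volumeA).sum) := by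
  obtain ⟨onC, offC, vol⟩ := st
  by_cases h : cc.1 == "on"
  · simp only [stepA, h, if_true, List.take_left, loop_sub, loop_add]
  · simp [stepA, h, loop_sub, loop_add, List.take_length]

lemma tag_append (cube : PvCube) (l1 l2 : List (PvCube × Int)) :
    tag cube (l1 ++ l2) = tag cube l1 ++ tag cube l2 := by
  simp [tag]

lemma Inv_step {st : List PvCube × List PvCube × Int} {cubes : List (PvCube × Int)}
    (h : InvAB st cubes) (cc : String × PvCube) : InvAB (stepA st cc) (stepS cubes cc) := by
  obtain ⟨onC, offC, vol⟩ := st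
  obtain ⟨hperm, hvol⟩ := h
  simp only at hperm hvol
  have htag : (tag cc.2 ((onC.map (fun c => (c, (1:Int)))) ++ (offC.map (fun c => (c, (-1:Int)))))).Perm
      (tag cc.2 cubes) := tag_perm cc.2 hperm
  rw [tag_append, tag_pos, tag_neg] at htag
  rw [stepA_closed]
  unfold stepS
  have hpM : ((onC.map (fun c => (c, (1:Int)))) : Multiset (PvCube × Int))
      + ((offC.map (fun c => (c, (-1:Int)))) : Multiset (PvCube × Int))
      = (cubes : Multiset (PvCube × Int)) := by
    rw [Multiset.coe_add]; exact Multiset.coe_eq_coe.mpr hperm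
  have htM : (((hits cc.2 onC).map (fun c => (c, (-1:Int)))) : Multiset (PvCube × Int))
      + (((hits cc.2 offC).map (fun c => (c, (1:Int)))) : Multiset (PvCube × Int))
      = ((tag cc.2 cubes : List (PvCube × Int)) : Multiset (PvCube × Int)) := by
    rw [Multiset.coe_add]; exact Multiset.coe_eq_coe.mpr htag
  have hsc := score_perm htag
  rw [score_append, score_pos, score_neg] at hsc
  constructor
  · -- multiset equality of new states
    rw [← Multiset.coe_eq_coe]
    by_cases h : cc.1 == "on"
    · simp only [h, if_true, List.map_append, List.map_cons, List.map_nil, ← Multiset.coe_add]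
      rw [← hpM, ← htM]
      abel
    · simp only [h, Bool.false_eq_true, if_false, List.map_append, ← Multiset.coe_add]
      rw [← hpM, ← htM]
      abel
  · -- volume equals score
    by_cases h : cc.1 == "on"
    · simp only [h, if_true, score_append]; rw [hvol]
      have hone : score [(cc.2, (1:Int))] = volumeA cc.2 := by simp [score]
      rw [hone]
      linarith [hsc]
    · simp only [h, Bool.false_eq_true, if_false, score_append]; rw [hvol]
      linarith [hsc]

lemma coveredL_nil (l : List (PvCube × Int)) : coveredL l [] = 0 := by
  simp [coveredL, coveredB]

lemma coveredL_append (l1 l2 : List (PvCube × Int)) (cmds : List (String × PvCube)) :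
    coveredL (l1 ++ l2) cmds = coveredL l1 cmds + coveredL l2 cmds := by
  simp [coveredL]

-- unfolding coveredB on one more command, summed over a signed-cube list
lemma coveredL_cons (cc : String × PvCube) (tail : List (String × PvCube)) :
    ∀ (l : List (PvCube × Int)),
    coveredL l (cc :: tail)
      = coveredL l tail - score (tag cc.2 l) + coveredL (tag cc.2 l) tail := by
  intro l
  induction l with
  | nil => simp [coveredL, tag, score]
  | cons cs t ih =>
    obtain ⟨c, s⟩ := cs
    simp only [coveredL, tag, score, List.map_cons, List.sum_cons, List.filterMap_cons] at ih ⊢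
    have hcov : coveredB c (cc :: tail)
        = (if volB (meetB c cc.2) > 0 then volB (meetB c cc.2) - coveredB (meetB c cc.2) tail else 0)
          + coveredB c tail := by
      obtain ⟨cmd, cube⟩ := cc
      simp [coveredB]
    rw [hcov, meetB_comm c cc.2]
    by_cases h : volB (meetB cc.2 c) > 0
    · simp only [h, if_true, List.map_cons, List.sum_cons]
      rw [volB_eq] at *
      linarith [ih]
    · simp only [h, if_false]
      linarith [ih]

-- the main bridge: running the signed-cube list over cmds from state l
lemma score_foldl_stepS (cmds : List (String × PvCube)) : ∀ (l : List (PvCube × Int)),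
    score (cmds.foldl stepS l) = score l - coveredL l cmds + activate_alt cmds := by
  induction cmds with
  | nil => intro l; simp [activate_alt, coveredL_nil]
  | cons cc tail ih =>
    intro l
    obtain ⟨cmd, cube⟩ := cc
    simp only [List.foldl_cons]
    rw [ih]
    unfold stepS
    simp only
    by_cases h : cmd == "on"
    · simp only [h, if_true]
      rw [score_append, score_append, coveredL_append, coveredL_append,
        coveredL_cons (cmd, cube) tail l]
      have h1 : score [(cube, (1:Int))] = volumeA cube := by simp [score]
      have h2 : coveredL [(cube, (1:Int))] tail = coveredB cube tail := by
        simp [coveredL]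
      have h3 : activate_alt ((cmd, cube) :: tail)
          = (volB cube - coveredB cube tail) + activate_alt tail := by
        simp [activate_alt, h]
      rw [h1, h2, h3, volB_eq]
      ring
    · simp only [h, Bool.false_eq_true, if_false]
      rw [score_append, coveredL_append, coveredL_cons (cmd, cube) tail l]
      have h3 : activate_alt ((cmd, cube) :: tail) = activate_alt tail := by
        simp only [activate_alt, h, Bool.false_eq_true, if_false]; ring
      rw [h3]
      ring

-- ===== VERDICT (by name: the statement is the Claim_ definition above) =====
theorem activate_spec : Claim_equal_activate := by
  intro commands _
  unfold Spec_activate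
  rw [activate_eq_foldl]
  have main : ∀ (cmds : List (String × PvCube)) st cubes, InvAB st cubes →
      InvAB (cmds.foldl stepA st) (cmds.foldl stepS cubes) := by
    intro cmds
    induction cmds with
    | nil => intro st cubes h; exact h
    | cons c t ih => intro st cubes h; exact ih _ _ (Inv_step h c)
  have h0 : InvAB ([], [], 0) [] := ⟨List.Perm.refl _, rfl⟩
  have h := (main commands _ _ h0).2
  rw [h, score_foldl_stepS]
  simp [score, coveredL]
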